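-- pv_equiv track=rewrite | github.com/stellar777/linkedin-prospector | url_builder.py | encode_sales_nav_query
-- ===== SOURCE A (Python) =====
-- def encode_sales_nav_query(raw_query: str) -> str:
--     result = []
--     for c in raw_query:
--         if c == ':':
--             result.append("%3A")
--         elif c == ',':
--             result.append("%2C")
--         elif c == ' ':
--             result.append("%2520")
--         elif c == '"':
--             result.append("%2522")
--         elif c == '/':
--             result.append("%252F")
--         else:
--             result.append(c)
--     return "".join(result)
-- ===== SOURCE B (Python) =====
-- def encode_sales_nav_query(raw_query: str) -> str:
--     return (raw_query
--             .replace(':', '%3A')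
--             .replace(',', '%2C')
--             .replace(' ', '%2520')
--             .replace('"', '%2522')
--             .replace('/', '%252F'))
-- ===== Notes on version B (the rewrite author's own statement) =====
-- stated objective: idiomatic
-- what changed: Replaced the single-pass per-character if/elif chain that accumulates list fragments and joins them with a chain of five str.replace calls, one full C-level scan per special character (order-safe: no replacement output contains any target character).
import Mathlib
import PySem

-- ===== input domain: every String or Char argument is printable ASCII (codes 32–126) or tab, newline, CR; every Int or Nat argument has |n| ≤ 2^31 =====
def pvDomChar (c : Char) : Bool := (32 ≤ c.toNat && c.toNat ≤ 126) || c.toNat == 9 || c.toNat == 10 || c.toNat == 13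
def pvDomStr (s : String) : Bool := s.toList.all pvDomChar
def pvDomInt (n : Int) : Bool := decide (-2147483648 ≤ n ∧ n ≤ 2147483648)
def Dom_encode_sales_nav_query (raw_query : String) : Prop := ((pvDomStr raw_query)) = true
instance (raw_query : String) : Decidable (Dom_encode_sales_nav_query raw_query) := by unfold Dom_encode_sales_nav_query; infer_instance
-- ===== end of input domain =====

-- B replaces A's single-pass per-character if/elif accumulation with an idiomatic chain of str.replace
-- calls (one per special character); return values proved equal, no speed claim.

-- ===== PORT A =====
-- literal port: accumulate string fragments in a list, then "".join
def encode_sales_nav_query (raw_query : String) : String :=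
  let result : List String :=
    raw_query.toList.foldl (fun acc c =>
      if c = ':' then acc ++ ["%3A"]
      else if c = ',' then acc ++ ["%2C"]
      else if c = ' ' then acc ++ ["%2520"]
      else if c = '"' then acc ++ ["%2522"]
      else if c = '/' then acc ++ ["%252F"]
      else acc ++ [String.ofList [c]]) []
  PySem.Str.join "" result

-- ===== PORT B =====
-- literal port of Source B: five chained str.replace calls
def encode_sales_nav_query_alt (raw_query : String) : String :=
  PySem.Str.replace
    (PySem.Str.replace
      (PySem.Str.replace
        (PySem.Str.replace
          (PySem.Str.replace raw_query ":" "%3A")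
          "," "%2C")
        " " "%2520")
      "\"" "%2522")
    "/" "%252F"

-- ===== PRECONDITION & SPEC =====
def Spec_encode_sales_nav_query (raw_query : String) (out : String) : Prop := out = encode_sales_nav_query_alt raw_query
instance (raw_query : String) (out : String) : Decidable (Spec_encode_sales_nav_query raw_query out) := by unfold Spec_encode_sales_nav_query; infer_instance

-- ===== CLAIM (what is proved, stated in full; the proofs are below) =====
def Claim_equal_encode_sales_nav_query : Prop := ∀ (raw_query : String), Dom_encode_sales_nav_query raw_query → Spec_encode_sales_nav_query raw_query (encode_sales_nav_query raw_query)

-- ===== LEMMAS AND PROOFS =====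

-- single-char replacement as a flatMap
def replOne (o : Char) (new : List Char) (l : List Char) : List Char :=
  l.flatMap (fun c => if c = o then new else [c])

theorem replOne_cons (o : Char) (new : List Char) (c : Char) (l : List Char) :
    replOne o new (c :: l) = (if c = o then new else [c]) ++ replOne o new l := by
  simp [replOne]

theorem replOne_append (o : Char) (new : List Char) (x y : List Char) :
    replOne o new (x ++ y) = replOne o new x ++ replOne o new y := by
  simp [replOne]

theorem go_single (o : Char) (new : List Char) :
    ∀ (fuel : Nat) (l acc : List Char), l.length ≤ fuel →
      PySem.Chars.replace.go [o] new fuel l acc = acc.reverse ++ replOne o new l := by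
  intro fuel
  induction fuel with
  | zero =>
    intro l acc h
    have : l = [] := List.eq_nil_of_length_eq_zero (Nat.le_zero.mp h)
    subst this
    simp [PySem.Chars.replace.go, replOne]
  | succ n ih =>
    intro l acc h
    cases l with
    | nil => simp [PySem.Chars.replace.go, replOne]
    | cons c t =>
      rw [PySem.Chars.replace.go]
      by_cases hc : c = o
      · subst hc
        have hpre : List.isPrefixOf [c] (c :: t) = true := by
          simp [List.isPrefixOf]
        simp only [hpre, if_pos]
        simp only [List.length_cons, List.length_nil, List.drop_succ_cons, List.drop_zero]
        rw [ih t (new.reverse ++ acc) (by simpa using Nat.le_of_succ_le_succ h)]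
        simp [replOne_cons]
      · have hpre : List.isPrefixOf [o] (c :: t) = false := by
          simp [List.isPrefixOf]
          exact fun h' => hc h'.symm
        rw [if_neg (by rw [hpre]; exact Bool.false_ne_true)]
        rw [ih t (c :: acc) (by simpa using Nat.le_of_succ_le_succ h)]
        simp [replOne_cons, hc]

theorem replace_single (o : Char) (new l : List Char) :
    PySem.Chars.replace l [o] new = replOne o new l := by
  rw [PySem.Chars.replace]
  simp only [List.isEmpty_cons, Bool.false_eq_true, if_false]
  simpa using go_single o new l.length l [] (le_refl _)

-- per-character encoding performed by A
def encChar (c : Char) : List Char :=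
  if c = ':' then "%3A".toList
  else if c = ',' then "%2C".toList
  else if c = ' ' then "%2520".toList
  else if c = '"' then "%2522".toList
  else if c = '/' then "%252F".toList
  else [c]

-- the five replacements chained, on char lists
def chainRep (l : List Char) : List Char :=
  replOne '/' "%252F".toList
    (replOne '"' "%2522".toList
      (replOne ' ' "%2520".toList
        (replOne ',' "%2C".toList
          (replOne ':' "%3A".toList l))))

theorem chainRep_append (x y : List Char) :
    chainRep (x ++ y) = chainRep x ++ chainRep y := by
  simp [chainRep, replOne_append]

theorem chainRep_single (c : Char) : chainRep [c] = encChar c := by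
  by_cases h1 : c = ':'
  · subst h1; decide
  · by_cases h2 : c = ','
    · subst h2; decide
    · by_cases h3 : c = ' '
      · subst h3; decide
      · by_cases h4 : c = '"'
        · subst h4; decide
        · by_cases h5 : c = '/'
          · subst h5; decide
          · simp [chainRep, replOne, encChar, h1, h2, h3, h4, h5]

theorem chainRep_eq_flatMap (l : List Char) : chainRep l = l.flatMap encChar := by
  induction l with
  | nil => decide
  | cons c t ih =>
    have : (c :: t) = [c] ++ t := rfl
    rw [this, chainRep_append, chainRep_single, ih]; simp

-- A's foldl accumulates exactly the per-char fragments
theorem foldA_acc (l : List Char) (acc : List String) :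
    l.foldl (fun acc c =>
      if c = ':' then acc ++ ["%3A"]
      else if c = ',' then acc ++ ["%2C"]
      else if c = ' ' then acc ++ ["%2520"]
      else if c = '"' then acc ++ ["%2522"]
      else if c = '/' then acc ++ ["%252F"]
      else acc ++ [String.ofList [c]]) acc
    = acc ++ l.map (fun c => String.ofList (encChar c)) := by
  induction l generalizing acc with
  | nil => simp
  | cons c t ih =>
    simp only [List.foldl_cons, List.map_cons, ih]
    by_cases h1 : c = ':'
    · subst h1; simp [encChar]
    · by_cases h2 : c = ','
      · subst h2; simp [encChar]
      · by_cases h3 : c = ' '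
        · subst h3; simp [encChar]
        · by_cases h4 : c = '"'
          · subst h4; simp [encChar]
          · by_cases h5 : c = '/'
            · subst h5; simp [encChar]
            · simp [encChar, h1, h2, h3, h4, h5]

theorem join_empty (parts : List (List Char)) :
    PySem.Chars.join [] parts = parts.flatten := by
  induction parts with
  | nil => rfl
  | cons p ps ih =>
    cases ps with
    | nil => simp [PySem.Chars.join, List.intercalate]
    | cons q qs =>
      have step : List.intercalate ([]:List Char) (p :: q :: qs)
          = p ++ List.intercalate [] (q :: qs) := by
        simp [List.intercalate, List.intersperse]
      simp only [PySem.Chars.join] at ih ⊢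
      rw [step, ih]; simp

-- ===== VERDICT (by name: the statement is the Claim_ definition above) =====
theorem encode_sales_nav_query_spec : Claim_equal_encode_sales_nav_query := by
  intro raw_query _
  unfold Spec_encode_sales_nav_query
  rw [← String.toList_inj]
  simp only [encode_sales_nav_query, encode_sales_nav_query_alt]
  rw [foldA_acc]
  simp only [List.nil_append, PySem.Str.toList_join, List.map_map]
  have hmap : (List.map (String.toList ∘ fun c => String.ofList (encChar c)) raw_query.toList)
      = raw_query.toList.map encChar := by
    simp [Function.comp]
  have hnil : ("" : String).toList = [] := rfl
  rw [hmap, hnil, join_empty, PySem.Str.toList_replace, PySem.Str.toList_replace,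
      PySem.Str.toList_replace, PySem.Str.toList_replace, PySem.Str.toList_replace]
  have hchain := chainRep_eq_flatMap raw_query.toList
  have e1 : (":" : String).toList = [':'] := rfl
  have e2 : ("," : String).toList = [','] := rfl
  have e3 : (" " : String).toList = [' '] := rfl
  have e4 : ("\"" : String).toList = ['"'] := rfl
  have e5 : ("/" : String).toList = ['/'] := rfl
  rw [e1, e2, e3, e4, e5]
  simp only [chainRep] at hchain
  rw [replace_single, replace_single, replace_single, replace_single, replace_single,
      hchain, List.flatMap]
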